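-- pv_equiv track=rewrite | github.com/guzhuoming/Source-Data-Temporal-Link-Prediction | queen.py | get_optimal_status
-- ===== SOURCE A (Python) =====
-- def get_conflict_num(cur_status):
--     """
--     获取当前状态下互相攻击的皇后对数
--     :param cur_status: 棋盘当前的状态
--     :return:  当前状态下发生冲突的皇后对数
--     """
--     n = len(cur_status)
--     conflict_num = 0
--     for col1 in range(0, n):
--         for col2 in range(col1+1, n):
--             if cur_status[col1] == cur_status[col2] or ((col2-col1) == abs(cur_status[col1]-cur_status[col2])):
--                 conflict_num += 1
--     return conflict_num
--
-- def get_optimal_status(cur_status, cur_conflict):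
--     """
--     返回当前状态最优的邻居状态，如果不存在，返回本身
--     :param cur_status: 棋盘当前状态
--     :param cur_conflict: 当前状态互相攻击的皇后对数
--     :return: 棋盘新的状态和新状态下互相攻击的皇后对数
--     """
--     n = len(cur_status)
--     for i in range(0, n-1):
--         for j in range(i+1, n):
--             cur_status[i], cur_status[j] = cur_status[j], cur_status[i]
--             # 任意两列的皇后调换位置
--             new_conflict = get_conflict_num(cur_status)
--             if new_conflict < cur_conflict:
--             # 若调换后互相攻击的皇后对数比之前少，返回调换后的状态
--                 cur_conflict = new_conflict
--                 return cur_status, cur_conflict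
--             cur_status[i], cur_status[j] = cur_status[j], cur_status[i]
--     return cur_status, cur_conflict
-- ===== SOURCE B (Python) =====
-- def _attacks(c1, r1, c2, r2):
--     """1 if queens at (column c1, row r1) and (column c2, row r2) attack each other, else 0."""
--     return 1 if r1 == r2 or abs(c2 - c1) == abs(r1 - r2) else 0
--
-- def get_optimal_status(cur_status, cur_conflict):
--     n = len(cur_status)
--     # count the conflicts of the current board ONCE, in O(n): a pair of queens
--     # attacks iff it shares a row, a diagonal (r - c) or an anti-diagonal (r + c),
--     # and for distinct columns at most one of the three can hold, so tallying
--     # same-key predecessors with three counting dicts counts exactly the attacking pairs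
--     rows = {}
--     diag = {}
--     anti = {}
--     base = 0
--     for c in range(0, n):
--         r = cur_status[c]
--         base += rows.get(r, 0) + diag.get(r - c, 0) + anti.get(r + c, 0)
--         rows[r] = rows.get(r, 0) + 1
--         diag[r - c] = diag.get(r - c, 0) + 1
--         anti[r + c] = anti.get(r + c, 0) + 1
--     # for each candidate swap (i, j), compute the conflict count of the swapped
--     # board incrementally: only pairs touching column i or j change, and the
--     # pair (i, j) itself is unaffected by its own swap.
--     for i in range(0, n - 1):
--         for j in range(i + 1, n):
--             ri, rj = cur_status[i], cur_status[j]
--             delta = 0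
--             for k in range(0, n):
--                 if k != i and k != j:
--                     rk = cur_status[k]
--                     delta = delta + (_attacks(k, rk, i, rj) - _attacks(k, rk, i, ri)) \
--                                   + (_attacks(k, rk, j, ri) - _attacks(k, rk, j, rj))
--             new_conflict = base + delta
--             if new_conflict < cur_conflict:
--                 cur_status[i], cur_status[j] = rj, ri
--                 return cur_status, new_conflict
--     return cur_status, cur_conflict
-- ===== Notes on version B (the rewrite author's own statement) =====
-- stated objective: faster
-- what changed: B counts the board's conflicts once and then scores each candidate swap (i, j) by an O(n) incremental delta over the columns attacked by i or j, instead of A's full O(n^2) recount of all pairs for every swap.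
import Mathlib
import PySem

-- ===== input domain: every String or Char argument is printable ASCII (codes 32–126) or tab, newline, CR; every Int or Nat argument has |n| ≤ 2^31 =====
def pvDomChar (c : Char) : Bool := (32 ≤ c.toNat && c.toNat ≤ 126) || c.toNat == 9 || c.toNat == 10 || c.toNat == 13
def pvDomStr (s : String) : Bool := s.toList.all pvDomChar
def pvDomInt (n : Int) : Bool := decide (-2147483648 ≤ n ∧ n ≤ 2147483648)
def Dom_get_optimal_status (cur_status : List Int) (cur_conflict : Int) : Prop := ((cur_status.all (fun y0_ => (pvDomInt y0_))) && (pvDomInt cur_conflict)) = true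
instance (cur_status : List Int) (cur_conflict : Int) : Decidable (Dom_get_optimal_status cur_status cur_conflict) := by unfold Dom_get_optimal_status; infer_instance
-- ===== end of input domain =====

-- B replaces A's full O(n^2) conflict recount per candidate swap by one base count plus an
-- O(n) incremental delta per swap (only pairs touching the two swapped columns change): faster.
-- Both A and B mutate the caller's list when an improving swap is found (A also swaps back
-- transiently); the theorems below are about the RETURN value, and B performs the same final mutation.

-- ===== PORT A =====
-- Python's simultaneous 'cur_status[i], cur_status[j] = cur_status[j], cur_status[i]'
-- (both ports contain this very statement; reads happen before the two assignments)
def pySwap (s : List Int) (i j : Int) : List Int :=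
  let vj := PySem.List.pyGetD s j 0
  let vi := PySem.List.pyGetD s i 0
  PySem.List.pySetD (PySem.List.pySetD s i vj) j vi

def get_conflict_num (cur_status : List Int) : Int :=
  let n : Int := cur_status.length
  (PySem.List.pyRange 0 n 1).foldl (fun acc c1 =>
    (PySem.List.pyRange (c1 + 1) n 1).foldl (fun acc2 c2 =>
      if PySem.List.pyGetD cur_status c1 0 = PySem.List.pyGetD cur_status c2 0 ∨
         c2 - c1 = |PySem.List.pyGetD cur_status c1 0 - PySem.List.pyGetD cur_status c2 0|
      then acc2 + 1 else acc2) acc) 0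

-- the 'for j in range(i+1, n)' loop of A (early return = Option result)
def goA_inner (s : List Int) (cc i : Int) : List Int → Option (List Int × Int)
  | [] => none
  | j :: js =>
    let s' := pySwap s i j
    let nc := get_conflict_num s'
    if nc < cc then some (s', nc) else goA_inner s cc i js

-- the 'for i in range(0, n-1)' loop of A (after a failed inner loop A has swapped back, so the list is unchanged)
def goA_outer (s : List Int) (cc : Int) : List Int → List Int × Int
  | [] => (s, cc)
  | i :: is' =>
    match goA_inner s cc i (PySem.List.pyRange (i + 1) (s.length : Int) 1) with
    | some r => r
    | none => goA_outer s cc is'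

def get_optimal_status (cur_status : List Int) (cur_conflict : Int) : List Int × Int :=
  goA_outer cur_status cur_conflict (PySem.List.pyRange 0 ((cur_status.length : Int) - 1) 1)

-- ===== PORT B =====
def attacks (c1 r1 c2 r2 : Int) : Int :=
  if r1 = r2 ∨ |c2 - c1| = |r1 - r2| then 1 else 0

-- B's one-time count of the conflicts of the current board: one pass with three
-- counting dicts (rows / diagonals r-c / anti-diagonals r+c), tallying same-key predecessors
def baseStep (s : List Int)
    (st : Int × PySem.Dict Int Int × PySem.Dict Int Int × PySem.Dict Int Int) (c : Int) :
    Int × PySem.Dict Int Int × PySem.Dict Int Int × PySem.Dict Int Int :=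
  let r := PySem.List.pyGetD s c 0
  let rows := st.2.1
  let diag := st.2.2.1
  let anti := st.2.2.2
  (st.1 + rows.getD r 0 + diag.getD (r - c) 0 + anti.getD (r + c) 0,
   rows.insert r (rows.getD r 0 + 1),
   diag.insert (r - c) (diag.getD (r - c) 0 + 1),
   anti.insert (r + c) (anti.getD (r + c) 0 + 1))

def baseConflicts (s : List Int) (n : Int) : Int :=
  ((PySem.List.pyRange 0 n 1).foldl (baseStep s)
    (0, PySem.Dict.empty, PySem.Dict.empty, PySem.Dict.empty)).1

-- B's incremental conflict change caused by swapping columns i and j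
def swapDelta (s : List Int) (n i j : Int) : Int :=
  let ri := PySem.List.pyGetD s i 0
  let rj := PySem.List.pyGetD s j 0
  (PySem.List.pyRange 0 n 1).foldl (fun acc k =>
    if k ≠ i ∧ k ≠ j then
      let rk := PySem.List.pyGetD s k 0
      acc + (attacks k rk i rj - attacks k rk i ri)
          + (attacks k rk j ri - attacks k rk j rj)
    else acc) 0

def goB_inner (s : List Int) (cc base n i : Int) : List Int → Option (List Int × Int)
  | [] => none
  | j :: js =>
    let nc := base + swapDelta s n i j
    if nc < cc then some (pySwap s i j, nc) else goB_inner s cc base n i js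

def goB_outer (s : List Int) (cc base n : Int) : List Int → List Int × Int
  | [] => (s, cc)
  | i :: is' =>
    match goB_inner s cc base n i (PySem.List.pyRange (i + 1) n 1) with
    | some r => r
    | none => goB_outer s cc base n is'

def get_optimal_status_alt (cur_status : List Int) (cur_conflict : Int) : List Int × Int :=
  let n : Int := cur_status.length
  goB_outer cur_status cur_conflict (baseConflicts cur_status n) n (PySem.List.pyRange 0 (n - 1) 1)

-- ===== PRECONDITION & SPEC =====
def Spec_get_optimal_status (cur_status : List Int) (cur_conflict : Int) (out : List Int × Int) : Prop := out = get_optimal_status_alt cur_status cur_conflict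
instance (cur_status : List Int) (cur_conflict : Int) (out : List Int × Int) : Decidable (Spec_get_optimal_status cur_status cur_conflict out) := by unfold Spec_get_optimal_status; infer_instance

-- ===== CLAIM (what is proved, stated in full; the proofs are below) =====
def Claim_equal_get_optimal_status : Prop := ∀ (cur_status : List Int) (cur_conflict : Int), Dom_get_optimal_status cur_status cur_conflict → Spec_get_optimal_status cur_status cur_conflict (get_optimal_status cur_status cur_conflict)

-- ===== LEMMAS AND PROOFS =====

-- the board as a total row function (0 outside the board)
def fOf (s : List Int) : ℕ → Int := fun k => s.getD k 0

-- the attack indicator of columns c1 < c2 (ℕ positions)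
def tA (f : ℕ → Int) (c1 c2 : ℕ) : Int := attacks (c1 : Int) (f c1) (c2 : Int) (f c2)

-- conflict count: sum over ordered pairs c1 < c2 < n
def CF (n : ℕ) (f : ℕ → Int) : Int :=
  ∑ c1 ∈ Finset.range n, ∑ c2 ∈ Finset.Ico (c1 + 1) n, tA f c1 c2

-- sum over ALL ordered pairs (diagonal included)
def TF (n : ℕ) (f : ℕ → Int) : Int :=
  ∑ c1 ∈ Finset.range n, ∑ c2 ∈ Finset.range n, tA f c1 c2

-- the per-column contribution of swapping columns i and j
def DLT (f : ℕ → Int) (i j k : ℕ) : Int :=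
  (attacks (k : Int) (f k) (i : Int) (f j) - attacks (k : Int) (f k) (i : Int) (f i))
    + (attacks (k : Int) (f k) (j : Int) (f i) - attacks (k : Int) (f k) (j : Int) (f j))

def DL (n : ℕ) (f : ℕ → Int) (i j : ℕ) : Int :=
  ∑ k ∈ Finset.range n, if k ≠ i ∧ k ≠ j then DLT f i j k else 0

-- the row function after swapping columns i and j
def swf (f : ℕ → Int) (i j : ℕ) : ℕ → Int :=
  fun k => if k = i then f j else if k = j then f i else f k

theorem attacks_self (c r : Int) : attacks c r c r = 1 := by simp [attacks]

theorem attacks_symm (c1 r1 c2 r2 : Int) : attacks c1 r1 c2 r2 = attacks c2 r2 c1 r1 := by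
  simp [attacks, abs_sub_comm, eq_comm]

theorem attacks_row_symm (c1 r1 c2 r2 : Int) : attacks c1 r1 c2 r2 = attacks c1 r2 c2 r1 := by
  simp [attacks, abs_sub_comm, eq_comm]

-- list sum over an increasing Int range is a Finset.Ico sum
theorem sum_map_pyRange (a b : ℕ) (g : Int → Int) :
    ((PySem.List.pyRange (a : Int) (b : Int) 1).map g).sum = ∑ c ∈ Finset.Ico a b, g (c : Int) := by
  rw [PySem.List.pyRange_one]
  have h : ((b : Int) - (a : Int)).toNat = b - a := by omega
  rw [h, List.map_map, Finset.sum_Ico_eq_sum_range]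
  rfl

-- A's double attack-test loop, written with B's attack indicator (proof-side only)
def pairFold (s : List Int) (n : Int) : Int :=
  (PySem.List.pyRange 0 n 1).foldl (fun acc c1 =>
    (PySem.List.pyRange (c1 + 1) n 1).foldl (fun acc2 c2 =>
      acc2 + attacks c1 (PySem.List.pyGetD s c1 0) c2 (PySem.List.pyGetD s c2 0)) acc) 0

theorem gcn_eq_pairFold (s : List Int) : get_conflict_num s = pairFold s (s.length : Int) := by
  unfold get_conflict_num pairFold
  refine PySem.List.foldl_congr_mem _ _ _ _ ?_
  intro acc c1 _
  refine PySem.List.foldl_congr_mem _ _ _ _ ?_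
  intro acc2 c2 hc2
  have h12 : c1 < c2 := by
    rcases (PySem.List.mem_pyRange_one).1 hc2 with ⟨h1, _⟩
    omega
  unfold attacks
  rw [abs_of_pos (by omega : (0 : Int) < c2 - c1)]
  split_ifs <;> ring

theorem sum_map_pyRange0 (b : ℕ) (g : Int → Int) :
    ((PySem.List.pyRange 0 (b : Int) 1).map g).sum = ∑ c ∈ Finset.range b, g (c : Int) := by
  have h := sum_map_pyRange 0 b g
  rw [Nat.cast_zero] at h
  rw [Finset.range_eq_Ico]
  exact h

theorem pairFold_eq_CF (s : List Int) (n : ℕ) : pairFold s (n : Int) = CF n (fOf s) := by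
  unfold pairFold CF
  rw [PySem.List.foldl_congr_mem _ _
      (fun acc c1 => acc + ((PySem.List.pyRange (c1 + 1) (n : Int) 1).map
        (fun c2 => attacks c1 (PySem.List.pyGetD s c1 0) c2 (PySem.List.pyGetD s c2 0))).sum) _
      (fun acc c1 _ => PySem.List.foldl_add _ _ _)]
  rw [PySem.List.foldl_add, zero_add, sum_map_pyRange0]
  refine Finset.sum_congr rfl ?_
  intro c _
  have hc1 : ((c : Int) + 1) = (((c + 1 : ℕ)) : Int) := by push_cast; ring
  rw [hc1, sum_map_pyRange (c + 1) n]
  refine Finset.sum_congr rfl ?_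
  intro c2 _
  simp [tA, fOf, PySem.List.pyGetD_natCast]

-- conflict count as a triangle sum in the other orientation (what B's single pass accumulates)
def PB (n : ℕ) (f : ℕ → Int) : Int :=
  ∑ a ∈ Finset.range n, ∑ b ∈ Finset.range a, tA f b a

theorem att_decomp (b m : ℕ) (h : b < m) (rb rm : Int) :
    attacks (b : Int) rb (m : Int) rm
      = (if rb = rm then 1 else 0) + (if rb - b = rm - m then 1 else 0)
        + (if rb + b = rm + m then 1 else 0) := by
  unfold attacks
  have h1 : |(m : Int) - b| = (m : Int) - b := abs_of_pos (by omega)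
  rw [h1]
  rcases abs_cases (rb - rm) with ⟨h2, h3⟩ | ⟨h2, h3⟩ <;> rw [h2] <;> split_ifs <;> omega

theorem triangle_swap (n : ℕ) (t : ℕ → ℕ → Int) :
    ∑ c1 ∈ Finset.range n, ∑ c2 ∈ Finset.range c1, t c1 c2
      = ∑ c2 ∈ Finset.range n, ∑ c1 ∈ Finset.Ico (c2 + 1) n, t c1 c2 := by
  have e1 : ∑ c1 ∈ Finset.range n, ∑ c2 ∈ Finset.range c1, t c1 c2
      = ∑ c1 ∈ Finset.range n, ∑ c2 ∈ Finset.range n, if c2 < c1 then t c1 c2 else 0 := by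
    refine Finset.sum_congr rfl ?_
    intro c1 hc1
    have hc1n : c1 < n := Finset.mem_range.1 hc1
    rw [Finset.sum_ite, Finset.sum_const_zero, add_zero]
    refine Finset.sum_congr ?_ (fun _ _ => rfl)
    ext x
    simp only [Finset.mem_filter, Finset.mem_range]
    omega
  have e2 : ∑ c2 ∈ Finset.range n, ∑ c1 ∈ Finset.Ico (c2 + 1) n, t c1 c2
      = ∑ c2 ∈ Finset.range n, ∑ c1 ∈ Finset.range n, if c2 < c1 then t c1 c2 else 0 := by
    refine Finset.sum_congr rfl ?_
    intro c2 _
    rw [Finset.sum_ite, Finset.sum_const_zero, add_zero]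
    refine Finset.sum_congr ?_ (fun _ _ => rfl)
    ext x
    simp only [Finset.mem_filter, Finset.mem_range, Finset.mem_Ico]
    omega
  rw [e1, e2, Finset.sum_comm]

theorem fOf_def (s : List Int) (k : ℕ) : s.getD k 0 = fOf s k := rfl

theorem base_eq_CF (s : List Int) (n : ℕ) : baseConflicts s (n : Int) = CF n (fOf s) := by
  have inv : ∀ m : ℕ,
      ∃ dr dd da : PySem.Dict Int Int,
        (PySem.List.pyRange 0 (m : Int) 1).foldl (baseStep s)
            (0, PySem.Dict.empty, PySem.Dict.empty, PySem.Dict.empty)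
          = (PB m (fOf s), dr, dd, da)
        ∧ (∀ v, dr.getD v 0 = ∑ b ∈ Finset.range m, if fOf s b = v then (1 : ℤ) else 0)
        ∧ (∀ v, dd.getD v 0 = ∑ b ∈ Finset.range m, if fOf s b - (b : Int) = v then (1 : ℤ) else 0)
        ∧ (∀ v, da.getD v 0 = ∑ b ∈ Finset.range m, if fOf s b + (b : Int) = v then (1 : ℤ) else 0) := by
    intro m
    induction m with
    | zero =>
      refine ⟨PySem.Dict.empty, PySem.Dict.empty, PySem.Dict.empty, ?_, ?_, ?_, ?_⟩
      · rw [Nat.cast_zero, PySem.List.pyRange_one_eq_nil (le_refl 0)]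
        simp [PB]
      all_goals intro v
      all_goals simp [PySem.Dict.getD_empty]
    | succ m ih =>
      obtain ⟨dr, dd, da, heq, hr, hd, ha⟩ := ih
      refine ⟨dr.insert (fOf s m) (dr.getD (fOf s m) 0 + 1),
              dd.insert (fOf s m - (m : Int)) (dd.getD (fOf s m - (m : Int)) 0 + 1),
              da.insert (fOf s m + (m : Int)) (da.getD (fOf s m + (m : Int)) 0 + 1),
              ?_, ?_, ?_, ?_⟩
      · have hm1 : ((m + 1 : ℕ) : Int) = (m : Int) + 1 := by push_cast; ring
        rw [hm1, PySem.List.pyRange_one_succ_right (by omega : (0 : Int) ≤ (m : Int)),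
            List.foldl_append, heq]
        simp only [List.foldl_cons, List.foldl_nil, baseStep, PySem.List.pyGetD_natCast, fOf_def,
          Prod.mk.injEq, and_true]
        rw [hr, hd, ha]
        have hstep : ∑ b ∈ Finset.range m, tA (fOf s) b m
            = ∑ b ∈ Finset.range m,
                ((if fOf s b = fOf s m then (1 : ℤ) else 0)
                  + (if fOf s b - (b : Int) = fOf s m - (m : Int) then (1 : ℤ) else 0)
                  + (if fOf s b + (b : Int) = fOf s m + (m : Int) then (1 : ℤ) else 0)) :=
          Finset.sum_congr rfl (fun b hb =>
            att_decomp b m (Finset.mem_range.1 hb) (fOf s b) (fOf s m))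
        unfold PB
        rw [Finset.sum_range_succ, hstep, Finset.sum_add_distrib, Finset.sum_add_distrib]
        ring
      · intro v
        rw [PySem.Dict.getD_insert, Finset.sum_range_succ, hr v]
        by_cases hv : v = fOf s m
        · subst hv
          rw [if_pos rfl, if_pos rfl, hr]
        · rw [if_neg hv, if_neg (fun h => hv h.symm), add_zero]
      · intro v
        rw [PySem.Dict.getD_insert, Finset.sum_range_succ, hd v]
        by_cases hv : v = fOf s m - (m : Int)
        · subst hv
          rw [if_pos rfl, if_pos rfl, hd]
        · rw [if_neg hv, if_neg (fun h => hv h.symm), add_zero]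
      · intro v
        rw [PySem.Dict.getD_insert, Finset.sum_range_succ, ha v]
        by_cases hv : v = fOf s m + (m : Int)
        · subst hv
          rw [if_pos rfl, if_pos rfl, ha]
        · rw [if_neg hv, if_neg (fun h => hv h.symm), add_zero]
  obtain ⟨dr, dd, da, heq, -, -, -⟩ := inv n
  unfold baseConflicts
  rw [heq]
  show PB n (fOf s) = CF n (fOf s)
  unfold PB CF
  exact triangle_swap n (fun a b => tA (fOf s) b a)

theorem delta_eq_DL (s : List Int) (n i j : ℕ) :
    swapDelta s (n : Int) (i : Int) (j : Int) = DL n (fOf s) i j := by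
  unfold swapDelta DL
  rw [PySem.List.foldl_congr_mem _ _
      (fun acc k => acc + (if k ≠ (i : Int) ∧ k ≠ (j : Int) then
        (attacks k (PySem.List.pyGetD s k 0) i (PySem.List.pyGetD s j 0)
          - attacks k (PySem.List.pyGetD s k 0) i (PySem.List.pyGetD s i 0))
        + (attacks k (PySem.List.pyGetD s k 0) j (PySem.List.pyGetD s i 0)
          - attacks k (PySem.List.pyGetD s k 0) j (PySem.List.pyGetD s j 0)) else 0)) _
      (fun acc k _ => by
        by_cases h : k ≠ (i : Int) ∧ k ≠ (j : Int)
        · simp only [if_pos h]; ring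
        · simp only [if_neg h]; ring)]
  rw [PySem.List.foldl_add, zero_add, sum_map_pyRange0]
  refine Finset.sum_congr rfl ?_
  intro k _
  by_cases hk : k ≠ i ∧ k ≠ j
  · simp [hk, Nat.cast_inj, DLT, fOf, PySem.List.pyGetD_natCast]
  · simp [Nat.cast_inj, hk]

theorem getD_set' (s : List Int) (i k : ℕ) (v : Int) :
    (s.set i v).getD k 0 = if i = k ∧ i < s.length then v else s.getD k 0 := by
  simp only [List.getD_eq_getElem?_getD, List.getElem?_set]
  by_cases h1 : i = k
  · subst h1
    by_cases h2 : i < s.length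
    · simp [h2]
    · simp [h2]
  · simp [h1]

theorem fOf_pySwap (s : List Int) (i j : ℕ) (hi : i < s.length) (hj : j < s.length) :
    fOf (pySwap s (i : Int) (j : Int)) = swf (fOf s) i j := by
  funext k
  simp only [fOf, swf, pySwap, PySem.List.pySetD_natCast, PySem.List.pyGetD_natCast]
  rw [getD_set', getD_set']
  simp only [List.length_set]
  by_cases h1 : k = i
  · simp_all
  · by_cases h2 : k = j
    · simp_all
    · simp_all [Ne.symm h1, Ne.symm h2]

theorem length_pySwap (s : List Int) (i j : Int) : (pySwap s i j).length = s.length := by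
  simp [pySwap, PySem.List.length_pySetD]

theorem tA_self (f : ℕ → Int) (c : ℕ) : tA f c c = 1 := attacks_self _ _

theorem tA_symm (f : ℕ → Int) (a b : ℕ) : tA f a b = tA f b a := attacks_symm _ _ _ _

theorem TF_eq (n : ℕ) (f : ℕ → Int) : TF n f = 2 * CF n f + n := by
  have hsplit : ∀ c1 ∈ Finset.range n, ∑ c2 ∈ Finset.range n, tA f c1 c2
      = (∑ c2 ∈ Finset.range c1, tA f c1 c2) + (1 + ∑ c2 ∈ Finset.Ico (c1 + 1) n, tA f c1 c2) := by
    intro c1 hc1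
    have hc1n : c1 < n := Finset.mem_range.1 hc1
    rw [Finset.range_eq_Ico, ← Finset.sum_Ico_consecutive (tA f c1) (Nat.zero_le c1) (le_of_lt hc1n),
        Finset.sum_eq_sum_Ico_succ_bot hc1n (tA f c1), tA_self]
  unfold TF
  rw [Finset.sum_congr rfl hsplit, Finset.sum_add_distrib, Finset.sum_add_distrib,
      Finset.sum_const, triangle_swap n (tA f)]
  have hsw : ∑ c2 ∈ Finset.range n, ∑ c1 ∈ Finset.Ico (c2 + 1) n, tA f c1 c2 = CF n f := by
    unfold CF
    refine Finset.sum_congr rfl ?_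
    intro c2 _
    refine Finset.sum_congr rfl ?_
    intro c1 _
    exact tA_symm f c1 c2
  rw [hsw]
  unfold CF
  simp only [Finset.card_range, nsmul_eq_mul, mul_one]
  ring

theorem sum3 (n i j : ℕ) (hij : i ≠ j) (hi : i < n) (hj : j < n) (h : ℕ → Int) :
    ∑ c ∈ Finset.range n, h c
      = h i + h j + ∑ c ∈ ((Finset.range n).erase i).erase j, h c := by
  have hi' : i ∈ Finset.range n := Finset.mem_range.2 hi
  have hj' : j ∈ (Finset.range n).erase i :=
    Finset.mem_erase.2 ⟨Ne.symm hij, Finset.mem_range.2 hj⟩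
  rw [← Finset.add_sum_erase _ h hi', ← Finset.add_sum_erase _ h hj']
  ring

theorem TF_update (n : ℕ) (f : ℕ → Int) (i j : ℕ) (hij : i ≠ j) (hi : i < n) (hj : j < n) :
    TF n (swf f i j) = TF n f + 2 * DL n f i j := by
  set R := ((Finset.range n).erase i).erase j with hR
  set d : ℕ → ℕ → Int := fun c1 c2 => tA (swf f i j) c1 c2 - tA f c1 c2 with hd
  have hsi : swf f i j i = f j := by simp [swf]
  have hsj : swf f i j j = f i := by simp [swf, Ne.symm hij]
  have hsk : ∀ k, k ≠ i → k ≠ j → swf f i j k = f k := by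
    intro k h1 h2; simp [swf, h1, h2]
  have memR : ∀ c ∈ R, c ≠ i ∧ c ≠ j := by
    intro c hc
    rw [hR] at hc
    rcases Finset.mem_erase.1 hc with ⟨hcj, hc2⟩
    rcases Finset.mem_erase.1 hc2 with ⟨hci, _⟩
    exact ⟨hci, hcj⟩
  have hz : ∀ c1 c2, c1 ≠ i → c1 ≠ j → c2 ≠ i → c2 ≠ j → d c1 c2 = 0 := by
    intro c1 c2 h1 h2 h3 h4
    simp [hd, tA, hsk _ h1 h2, hsk _ h3 h4]
  have hsym : ∀ c1 c2, d c1 c2 = d c2 c1 := by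
    intro c1 c2
    simp only [hd, tA]
    rw [attacks_symm ((c1 : Int)) (swf f i j c1) ((c2 : Int)) (swf f i j c2),
        attacks_symm ((c1 : Int)) (f c1) ((c2 : Int)) (f c2)]
  have hdii : d i i = 0 := by simp [hd, tA, attacks_self, hsi]
  have hdjj : d j j = 0 := by simp [hd, tA, attacks_self, hsj]
  have hdij : d i j = 0 := by
    simp only [hd, tA, hsi, hsj]
    rw [attacks_row_symm ((i : Int)) (f j) ((j : Int)) (f i)]
    ring
  have hdji : d j i = 0 := by rw [hsym]; exact hdij
  have hrow : ∀ c1, ∑ c2 ∈ Finset.range n, d c1 c2 = d c1 i + d c1 j + ∑ c2 ∈ R, d c1 c2 :=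
    fun c1 => sum3 n i j hij hi hj (d c1)
  have hdiff : ∑ c1 ∈ Finset.range n, ∑ c2 ∈ Finset.range n, d c1 c2
      = TF n (swf f i j) - TF n f := by
    simp only [hd, Finset.sum_sub_distrib]
    rfl
  have hmain : ∑ c1 ∈ Finset.range n, ∑ c2 ∈ Finset.range n, d c1 c2
      = 2 * ∑ k ∈ R, (d k i + d k j) := by
    rw [sum3 n i j hij hi hj (fun c1 => ∑ c2 ∈ Finset.range n, d c1 c2)]
    rw [hrow i, hrow j, hdii, hdij, hdji, hdjj]
    have hRrow : ∀ c1 ∈ R, ∑ c2 ∈ Finset.range n, d c1 c2 = d c1 i + d c1 j := by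
      intro c1 hc1
      rw [hrow c1]
      have hzero : ∑ c2 ∈ R, d c1 c2 = 0 :=
        Finset.sum_eq_zero (fun c2 hc2 =>
          hz c1 c2 (memR c1 hc1).1 (memR c1 hc1).2 (memR c2 hc2).1 (memR c2 hc2).2)
      rw [hzero]; ring
    rw [Finset.sum_congr rfl hRrow]
    have h1 : ∑ c2 ∈ R, d i c2 = ∑ c2 ∈ R, d c2 i :=
      Finset.sum_congr rfl (fun c2 _ => hsym i c2)
    have h2 : ∑ c2 ∈ R, d j c2 = ∑ c2 ∈ R, d c2 j :=
      Finset.sum_congr rfl (fun c2 _ => hsym j c2)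
    rw [h1, h2, Finset.sum_add_distrib]
    ring
  have hdk : ∀ k ∈ R, d k i + d k j = DLT f i j k := by
    intro k hk
    rcases memR k hk with ⟨h1, h2⟩
    simp only [hd, tA, DLT, hsk k h1 h2, hsi, hsj]
  have hDL : DL n f i j = ∑ k ∈ R, DLT f i j k := by
    unfold DL
    rw [sum3 n i j hij hi hj]
    have e0 : (if i ≠ i ∧ i ≠ j then DLT f i j i else 0) = 0 := by simp
    have e1 : (if j ≠ i ∧ j ≠ j then DLT f i j j else 0) = 0 := by simp
    rw [e0, e1, zero_add, zero_add]
    exact Finset.sum_congr rfl (fun k hk => if_pos ⟨(memR k hk).1, (memR k hk).2⟩)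
  have hfin : ∑ k ∈ R, (d k i + d k j) = DL n f i j := by
    rw [hDL]
    exact Finset.sum_congr rfl hdk
  omega

theorem CF_update (n : ℕ) (f : ℕ → Int) (i j : ℕ) (hij : i ≠ j) (hi : i < n) (hj : j < n) :
    CF n (swf f i j) = CF n f + DL n f i j := by
  have h1 := TF_eq n f
  have h2 := TF_eq n (swf f i j)
  have h3 := TF_update n f i j hij hi hj
  omega

-- the value A recounts from scratch is B's base + delta
theorem conflict_swap (s : List Int) (i j : ℕ) (hij : i < j) (hj : j < s.length) :
    get_conflict_num (pySwap s (i : Int) (j : Int)) =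
      baseConflicts s (s.length : Int) + swapDelta s (s.length : Int) (i : Int) (j : Int) := by
  rw [gcn_eq_pairFold, pairFold_eq_CF, base_eq_CF, delta_eq_DL, length_pySwap,
      fOf_pySwap s i j (by omega) hj, CF_update s.length (fOf s) i j (by omega) (by omega) hj]

theorem inner_eq (s : List Int) (cc i : Int) (hi : 0 ≤ i) :
    ∀ js : List Int, (∀ j ∈ js, i < j ∧ j < (s.length : Int)) →
      goA_inner s cc i js = goB_inner s cc (baseConflicts s (s.length : Int)) (s.length : Int) i js := by
  intro js h
  induction js with
  | nil => rfl
  | cons j js ih =>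
    have hj := h j (by simp)
    obtain ⟨i', rfl⟩ : ∃ i' : ℕ, (i' : Int) = i := ⟨i.toNat, by omega⟩
    obtain ⟨j', rfl⟩ : ∃ j' : ℕ, (j' : Int) = j := ⟨j.toNat, by omega⟩
    have hlt : i' < j' := by omega
    have hjn : j' < s.length := by omega
    simp only [goA_inner, goB_inner]
    rw [conflict_swap s i' j' hlt hjn]
    by_cases hc : baseConflicts s (s.length : Int)
        + swapDelta s (s.length : Int) (i' : Int) (j' : Int) < cc
    · rw [if_pos hc, if_pos hc]
    · rw [if_neg hc, if_neg hc]
      exact ih (fun x hx => h x (by simp [hx]))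

theorem outer_eq (s : List Int) (cc : Int) :
    ∀ is' : List Int, (∀ i ∈ is', 0 ≤ i) →
      goA_outer s cc is' = goB_outer s cc (baseConflicts s (s.length : Int)) (s.length : Int) is' := by
  intro is' h
  induction is' with
  | nil => simp [goA_outer, goB_outer]
  | cons i is' ih =>
    have hi : 0 ≤ i := h i (by simp)
    simp only [goA_outer, goB_outer]
    rw [inner_eq s cc i hi (PySem.List.pyRange (i + 1) (s.length : Int) 1)
        (fun j hjmem => by
          rcases (PySem.List.mem_pyRange_one).1 hjmem with ⟨h1, h2⟩
          exact ⟨by omega, h2⟩)]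
    exact match goB_inner s cc (baseConflicts s (s.length : Int)) (s.length : Int) i
        (PySem.List.pyRange (i + 1) (s.length : Int) 1) with
      | some r => rfl
      | none => ih (fun x hx => h x (by simp [hx]))

-- ===== VERDICT (by name: the statement is the Claim_ definition above) =====
theorem get_optimal_status_spec : Claim_equal_get_optimal_status := by
  intro s cc _
  unfold Spec_get_optimal_status get_optimal_status get_optimal_status_alt
  exact outer_eq s cc (PySem.List.pyRange 0 ((s.length : Int) - 1) 1)
    (fun i hmem => ((PySem.List.mem_pyRange_one).1 hmem).1)
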